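-- pv_equiv track=rewrite | github.com/IntegerNumber01/Ekadhikena-Purvena | Nikhilam 4 (draft).py | is_tenth_power
-- ===== SOURCE A (Python) =====
-- def is_tenth_power(n):
--     # # Is integer checks if a float is an integer ex: 10.0 is True, 10.5 is False
--
--     if n <= 0:
--         return False
--     while n % 10 == 0:
--         n //= 10
--
--     if n == 1:
--         return True
--     else:
--         return False
-- ===== SOURCE B (Python) =====
-- def is_tenth_power(n):
--     if n <= 0:
--         return False
--     p = 1
--     while p < n:
--         p *= 10
--     return p == n
-- ===== Notes on version B (the rewrite author's own statement) =====
-- stated objective: alternative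
-- what changed: B multiplies an accumulator p=1 upward by 10 until p >= n and tests p == n, instead of A's stripping trailing zeros by repeated modulo/floor-division and comparing to 1.
import Mathlib
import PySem

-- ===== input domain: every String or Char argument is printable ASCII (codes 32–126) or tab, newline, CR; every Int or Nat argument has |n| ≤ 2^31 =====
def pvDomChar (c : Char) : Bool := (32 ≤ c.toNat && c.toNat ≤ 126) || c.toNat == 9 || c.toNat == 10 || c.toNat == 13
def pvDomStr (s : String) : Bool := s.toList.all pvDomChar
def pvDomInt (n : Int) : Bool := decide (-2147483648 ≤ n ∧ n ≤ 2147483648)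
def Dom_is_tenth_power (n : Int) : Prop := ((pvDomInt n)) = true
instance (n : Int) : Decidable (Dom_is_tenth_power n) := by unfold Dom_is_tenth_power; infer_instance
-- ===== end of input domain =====

-- B replaces A's strip-trailing-zeros division loop by an upward multiplication loop
-- (p = 1; p *= 10 while p < n; p == n): an alternative of the same cost, not claimed faster.

-- ===== PORT A =====
-- the while loop 'while n % 10 == 0: n //= 10'; the '0 < n' conjunct is only the
-- totality guard (A's loop runs with n > 0, where it is always true)
def pvStrip10 (n : Int) : Int :=
  if _h : 0 < n ∧ PySem.Int.mod n 10 = 0 then pvStrip10 (PySem.Int.floordiv n 10) else n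
termination_by n.toNat
decreasing_by
  rw [PySem.Int.floordiv_eq_ediv_of_pos (by norm_num)]
  omega

def is_tenth_power (n : Int) : Bool :=
  if n ≤ 0 then false
  else pvStrip10 n == 1

-- ===== PORT B =====
-- the while loop 'while p < n: p *= 10'; the '0 < p' conjunct is only the
-- totality guard (B's loop runs with p ≥ 1, where it is always true)
def pvGrow10 (n p : Int) : Int :=
  if h : 0 < p ∧ p < n then pvGrow10 n (p * 10) else p
termination_by (n - p).toNat
decreasing_by omega

def is_tenth_power_alt (n : Int) : Bool :=
  if n ≤ 0 then false
  else pvGrow10 n 1 == n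

-- ===== PRECONDITION & SPEC =====
def Spec_is_tenth_power (n : Int) (out : Bool) : Prop := out = is_tenth_power_alt n
instance (n : Int) (out : Bool) : Decidable (Spec_is_tenth_power n out) := by unfold Spec_is_tenth_power; infer_instance

-- ===== CLAIM (what is proved, stated in full; the proofs are below) =====
def Claim_equal_is_tenth_power : Prop := ∀ (n : Int), Dom_is_tenth_power n → Spec_is_tenth_power n (is_tenth_power n)

-- ===== LEMMAS AND PROOFS =====

theorem pvStrip10_char (n : Int) (hn : 0 < n) :
    pvStrip10 n = 1 ↔ ∃ k : Nat, n = 10 ^ k := by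
  rw [pvStrip10]
  by_cases h : PySem.Int.mod n 10 = 0
  · rw [dif_pos ⟨hn, h⟩]
    rw [PySem.Int.mod_eq_emod_of_pos (by norm_num)] at h
    rw [PySem.Int.floordiv_eq_ediv_of_pos (by norm_num)]
    have hdvd : (10 : Int) ∣ n := Int.dvd_of_emod_eq_zero h
    have hmul : 10 * (n / 10) = n := Int.mul_ediv_cancel' hdvd
    have hq : 0 < n / 10 := by
      rcases hdvd with ⟨c, hc⟩
      have : 0 < c := by nlinarith
      simp [hc, Int.mul_ediv_cancel_left c (by norm_num : (10:Int) ≠ 0)]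
      omega
    rw [pvStrip10_char (n / 10) hq]
    constructor
    · rintro ⟨k, hk⟩
      exact ⟨k + 1, by rw [← hmul, hk]; ring⟩
    · rintro ⟨k, hk⟩
      cases k with
      | zero => simp at hk; omega
      | succ j =>
        refine ⟨j, ?_⟩
        have : n = 10 * 10 ^ j := by rw [hk]; ring
        rw [← hmul] at this
        exact mul_left_cancel₀ (by norm_num : (10:Int) ≠ 0) this
  · rw [dif_neg (by tauto)]
    constructor
    · intro h1; exact ⟨0, by simpa using h1⟩
    · rintro ⟨k, hk⟩
      cases k with
      | zero => simpa using hk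
      | succ j =>
        exfalso; apply h
        rw [PySem.Int.mod_eq_emod_of_pos (by norm_num), hk]
        exact Int.emod_eq_zero_of_dvd ⟨10 ^ j, by ring⟩
termination_by n.toNat
decreasing_by
  omega

theorem pvGrow10_char (n p : Int) (hp : 0 < p) (hpn : p ≤ n) :
    pvGrow10 n p = n ↔ ∃ k : Nat, n = p * 10 ^ k := by
  rw [pvGrow10]
  by_cases hlt : p < n
  · rw [dif_pos ⟨hp, hlt⟩]
    by_cases hle : p * 10 ≤ n
    · rw [pvGrow10_char n (p * 10) (by omega) hle]
      constructor
      · rintro ⟨k, hk⟩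
        exact ⟨k + 1, by rw [hk]; ring⟩
      · rintro ⟨k, hk⟩
        cases k with
        | zero => simp at hk; omega
        | succ j => exact ⟨j, by rw [hk]; ring⟩
    · rw [pvGrow10]
      rw [dif_neg (by omega)]
      constructor
      · intro h; omega
      · rintro ⟨k, hk⟩
        cases k with
        | zero => simp at hk; omega
        | succ j =>
          exfalso
          have h1 : (1:Int) ≤ 10 ^ j := one_le_pow₀ (by norm_num)
          have : p * 10 ≤ p * 10 ^ (j + 1) := by
            have : (10:Int) ≤ 10 ^ (j + 1) := by
              calc (10:Int) = 10 * 1 := by ring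
              _ ≤ 10 * 10 ^ j := by nlinarith
              _ = 10 ^ (j + 1) := by ring
            nlinarith
          omega
  · rw [dif_neg (by tauto)]
    have hpe : p = n := by omega
    subst hpe
    simp only [true_iff]
    exact ⟨0, by ring⟩
termination_by (n - p).toNat
decreasing_by omega

-- ===== VERDICT (by name: the statement is the Claim_ definition above) =====
theorem is_tenth_power_spec : Claim_equal_is_tenth_power := by
  intro n _
  unfold Spec_is_tenth_power is_tenth_power is_tenth_power_alt
  by_cases hle : n ≤ 0
  · simp [hle]
  · rw [if_neg hle, if_neg hle]
    have hn : 0 < n := by omega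
    have h1 := pvStrip10_char n hn
    have h2 := pvGrow10_char n 1 one_pos (by omega)
    simp only [one_mul] at h2
    by_cases hex : ∃ k : Nat, n = 10 ^ k
    · rw [h1.mpr hex, h2.mpr hex]
      simp
    · have a1 : pvStrip10 n ≠ 1 := fun h => hex (h1.mp h)
      have a2 : pvGrow10 n 1 ≠ n := fun h => hex (h2.mp h)
      simp [a1, a2]
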